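-- pv_equiv track=rewrite | github.com/ktllee/plug_problem | brute.py | backwards
-- ===== SOURCE A (Python) =====
-- import itertools as it
--
-- def backwards(base, equal):
--     ''' takes:
--             base - a list of integers
--             equal - a list to look through
--         returns: a list of backwards-possible combos
--
--         does the thing recursively
--     '''
--     # differences
--     ordered = sorted(base)
--     diff = [x - ordered[0] for x in ordered]
--
--     # sorted equal
--     fixed = [sorted(x) for x in equal]
--
--     # looking through lists
--     maybe = []
--     for state in fixed:
--         for group in it.combinations(state, len(diff)):
--             ordy = sorted(group)
--             norm = [x - ordy[0] for x in ordy]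
--
--             if norm == diff:
--                 maybe.append([state, group])
--
--     # check through maybes
--     final = []
--     for possible in maybe:
--         poss = possible[0].copy()
--         for piece in possible[1]:
--             poss.remove(piece)
--         poss.append(possible[1][0] - ordered[0])
--         poss.sort()
--         if poss not in fixed:
--             final.append([poss, possible[0]])
--
--     return final
-- ===== SOURCE B (Python) =====
-- def is_subseq(small, big):
--     '''two-pointer greedy subsequence test'''
--     i = 0
--     for y in big:
--         if i < len(small) and small[i] == y:
--             i += 1
--     return i == len(small)
--
-- def count_subseq(xs, pat):
--     '''number of (index-)subsequences of xs equal to pat, by an O(len(xs)*len(pat)) DP'''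
--     if not pat:
--         return 1
--     dp = [0] * len(pat)
--     for x in xs:
--         dp = [d + (pr if p == x else 0) for d, pr, p in zip(dp, [1] + dp[:-1], pat)]
--     return dp[-1]
--
-- def backwards(base, equal):
--     ''' same result as brute.backwards: per state only the distinct candidate
--         minima are tried, each screened by a linear subsequence test and its
--         multiplicity counted by a subsequence DP, instead of enumerating all
--         C(n, k) combinations.'''
--     ordered = sorted(base)
--     b0 = ordered[0]
--     diff = [x - b0 for x in ordered]
--     fixed = [sorted(x) for x in equal]
--
--     final = []
--     for state in fixed:
--         if len(state) < len(diff):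
--             continue
--         prev = None
--         for m in state:
--             if prev is not None and m == prev:
--                 continue
--             prev = m
--             group = [m + d for d in diff]
--             if not is_subseq(group, state):
--                 continue
--             mult = count_subseq(state, group)
--             poss = state.copy()
--             for piece in group:
--                 poss.remove(piece)
--             poss.append(m - b0)
--             poss.sort()
--             if poss not in fixed:
--                 final.extend([[poss, state]] * mult)
--     return final
-- ===== Notes on version B (the rewrite author's own statement) =====
-- stated objective: alternative
-- what changed: Instead of enumerating all C(n,k) k-combinations of each sorted state and filtering those whose difference pattern matches, B tries only the distinct candidate minimum values m of the state, screens each with a two-pointer subsequence test, reconstructs the unique matching group [m+d for d in diff] directly, and counts its multiplicity (number of index-combinations) with a subsequence-counting DP; this avoids the combinatorial enumeration, though on random timing families both are often dominated by sorting.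
-- outside the precondition, e.g. on backwards([], []): A returns [], B raises IndexError
import Mathlib
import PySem

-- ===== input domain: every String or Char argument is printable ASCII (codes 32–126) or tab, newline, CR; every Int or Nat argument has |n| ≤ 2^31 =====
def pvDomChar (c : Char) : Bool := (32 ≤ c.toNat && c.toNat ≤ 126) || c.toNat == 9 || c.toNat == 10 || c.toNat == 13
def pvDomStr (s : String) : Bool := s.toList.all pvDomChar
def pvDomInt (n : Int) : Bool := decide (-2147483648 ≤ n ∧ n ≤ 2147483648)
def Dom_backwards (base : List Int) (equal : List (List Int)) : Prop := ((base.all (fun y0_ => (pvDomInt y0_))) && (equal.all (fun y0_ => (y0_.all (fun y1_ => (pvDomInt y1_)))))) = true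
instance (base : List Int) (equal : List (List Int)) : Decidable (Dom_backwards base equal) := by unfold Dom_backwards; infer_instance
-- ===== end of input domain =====

-- B uses a different algorithm: per state it tries only the distinct candidate minima,
-- screens each with a subsequence test and counts the group's multiplicity with a
-- subsequence DP, instead of enumerating and filtering all C(n,k) combinations.
-- (Return-value equivalence only; neither function mutates its arguments observably.)

-- ===== PORT A =====
def backwards (base : List Int) (equal : List (List Int)) : List (List (List Int)) :=
  let ordered := PySem.List.sorted base (fun x => x)
  -- ordered[0]: IndexError when base = [] (excluded by Pre_); headD is only reached with base ≠ []
  let o0 := ordered.headD 0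
  let diff := ordered.map (fun x => x - o0)
  let fixed := equal.map (fun x => PySem.List.sorted x (fun y => y))
  let maybe := fixed.foldl (fun acc state =>
      (PySem.List.combinations state diff.length).foldl (fun acc2 group =>
        let ordy := PySem.List.sorted group (fun y => y)
        let norm := ordy.map (fun x => x - ordy.headD 0)  -- ordy[0]: group nonempty since len(diff) ≥ 1 under Pre_
        if norm == diff then acc2 ++ [(state, group)] else acc2) acc) []
  maybe.foldl (fun fin pr =>
      -- poss.remove(piece): ValueError impossible here (group is a combination of state); getD keeps it total
      let poss := pr.2.foldl (fun p piece => (PySem.List.remove? p piece).getD p) pr.1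
      let poss2 := PySem.List.sorted (poss ++ [pr.2.headD 0 - o0]) (fun y => y)
      if fixed.contains poss2 then fin else fin ++ [[poss2, pr.1]]) []

-- ===== PORT B =====
-- Source B's "for m in state: skip if equal to previous" over a sorted state = the first element of each run
def uniqHead : List Int → List Int
  | [] => []
  | [x] => [x]
  | x :: y :: t => if x = y then uniqHead (y :: t) else x :: uniqHead (y :: t)

-- Source B's is_subseq: two-pointer greedy subsequence test
def isSubseq : List Int → List Int → Bool
  | [], _ => true
  | _ :: _, [] => false
  | x :: xs, y :: ys => if x = y then isSubseq xs ys else isSubseq (x :: xs) ys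

-- one step of Source B's dp comprehension: zip(dp, [1] + dp[:-1], pat), prev threads dp[j-1]
def dpStep (x : Int) : List Int → List Int → Int → List Int
  | p :: ps, d :: ds, prev => (d + if p == x then prev else 0) :: dpStep x ps ds d
  | _, _, _ => []

def countSubDP (xs pat : List Int) : Int :=
  if pat = [] then 1
  else (xs.foldl (fun dp x => dpStep x pat dp 1) (List.replicate pat.length 0)).getLastD 0

def backwards_alt (base : List Int) (equal : List (List Int)) : List (List (List Int)) :=
  let ordered := PySem.List.sorted base (fun x => x)
  let b0 := ordered.headD 0   -- ordered[0]: IndexError when base = [] (excluded by Pre_)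
  let diff := ordered.map (fun x => x - b0)
  let fixed := equal.map (fun x => PySem.List.sorted x (fun y => y))
  fixed.foldl (fun fin state =>
    if state.length < diff.length then fin
    else
      (uniqHead state).foldl (fun fin2 m =>
        let group := diff.map (fun d => m + d)
        if !(isSubseq group state) then fin2
        else
          let mult := countSubDP state group
          let poss := group.foldl (fun p piece => (PySem.List.remove? p piece).getD p) state
          let poss2 := PySem.List.sorted (poss ++ [m - b0]) (fun y => y)
          if fixed.contains poss2 then fin2
          else fin2 ++ List.replicate mult.toNat [poss2, state]) fin) []

-- ===== PRECONDITION & SPEC =====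
-- Pre_ excludes only base = []: there A raises IndexError at possible[1][0] for every nonempty equal,
-- except in the vacuous case equal = [] (A returns []), where B's algorithm itself raises at ordered[0]
def Pre_backwards (base : List Int) (equal : List (List Int)) : Prop := base ≠ []
instance (base : List Int) (equal : List (List Int)) : Decidable (Pre_backwards base equal) := by unfold Pre_backwards; infer_instance
def pvWitness_backwards : List Int × List (List Int) := ([1, 2], [[3, 2, 1, 4]])

def Spec_backwards (base : List Int) (equal : List (List Int)) (out : List (List (List Int))) : Prop := out = backwards_alt base equal
instance (base : List Int) (equal : List (List Int)) (out : List (List (List Int))) : Decidable (Spec_backwards base equal out) := by unfold Spec_backwards; infer_instance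

-- ===== CLAIM (what is proved, stated in full; the proofs are below) =====
def Claim_equal_backwards : Prop := ∀ (base : List Int) (equal : List (List Int)), Dom_backwards base equal → Pre_backwards base equal → Spec_backwards base equal (backwards base equal)

-- ===== LEMMAS AND PROOFS =====

-- the pattern group for candidate minimum m
def grp (diff : List Int) (m : Int) : List Int := diff.map (fun d => m + d)

-- A's match test, as a predicate on the candidate group
def isMatch (diff g : List Int) : Bool :=
  (PySem.List.sorted g (fun y => y)).map (fun x => x - (PySem.List.sorted g (fun y => y)).headD 0) == diff

-- mathematical subsequence count
def countSub : List Int → List Int → Nat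
  | _, [] => 1
  | [], _ :: _ => 0
  | x :: xs, p :: ps => countSub xs (p :: ps) + (if p = x then countSub xs ps else 0)

lemma uniqHead_mem (s : List Int) (m : Int) : m ∈ uniqHead s ↔ m ∈ s := by
  induction s with
  | nil => simp [uniqHead]
  | cons x s ih =>
    cases s with
    | nil => simp [uniqHead]
    | cons y t =>
      by_cases h : x = y
      · subst h; rw [show uniqHead (x :: x :: t) = uniqHead (x :: t) from by simp [uniqHead]]
        rw [ih]; simp
      · rw [show uniqHead (x :: y :: t) = x :: uniqHead (y :: t) from by simp [uniqHead, h]]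
        simp [ih]

lemma uniqHead_pairwise (s : List Int) (hs : s.Pairwise (· ≤ ·)) :
    (uniqHead s).Pairwise (· < ·) := by
  induction s with
  | nil => simp [uniqHead]
  | cons x s ih =>
    cases s with
    | nil => simp [uniqHead]
    | cons y t =>
      have hs' : (y :: t).Pairwise (· ≤ ·) := (List.pairwise_cons.mp hs).2
      have hx : ∀ w ∈ y :: t, x ≤ w := (List.pairwise_cons.mp hs).1
      by_cases h : x = y
      · subst h; rw [show uniqHead (x :: x :: t) = uniqHead (x :: t) from by simp [uniqHead]]
        exact ih hs'
      · rw [show uniqHead (x :: y :: t) = x :: uniqHead (y :: t) from by simp [uniqHead, h]]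
        rw [List.pairwise_cons]
        refine ⟨?_, ih hs'⟩
        intro z hz
        rw [uniqHead_mem] at hz
        have hxy : x ≤ y := hx y (by simp)
        rcases List.mem_cons.mp hz with rfl | hzt
        · omega
        · have h1 := (List.pairwise_cons.mp hs').1 z hzt
          omega

lemma countSub_pos_sublist (s v : List Int) (h : 0 < countSub s v) : v.Sublist s := by
  induction s generalizing v with
  | nil => cases v with
    | nil => simp
    | cons p ps => simp [countSub] at h
  | cons x xs ih =>
    cases v with
    | nil => simp
    | cons p ps =>
      simp only [countSub] at h
      by_cases hpx : p = x
      · subst hpx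
        by_cases h1 : 0 < countSub xs (p :: ps)
        · exact (ih _ h1).cons p
        · have h2 : 0 < countSub xs ps := by simp at h; omega
          exact (ih _ h2).cons₂ p
      · simp [hpx] at h
        exact (ih _ h).cons x

lemma count_cons_map (x : Int) (L : List (List Int)) (g : List Int) :
    (L.map (x :: ·)).count g = match g with
      | [] => 0
      | p :: ps => if p = x then L.count ps else 0 := by
  cases g with
  | nil => rw [List.count_eq_zero]; simp
  | cons p ps =>
    by_cases hpx : p = x
    · subst hpx
      simp only [if_pos rfl]
      exact List.count_map_of_injective _ _ (fun a b h => by injection h) _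
    · simp only [if_neg hpx]
      rw [List.count_eq_zero]
      intro hmem
      obtain ⟨a, _, ha⟩ := List.mem_map.mp hmem
      injection ha with h1 _
      exact hpx h1.symm

lemma count_combinations (s : List Int) (g : List Int) (k : Nat) :
    (PySem.List.combinations s k).count g = if g.length = k then countSub s g else 0 := by
  induction s generalizing g k with
  | nil =>
    cases k with
    | zero =>
      rw [PySem.List.combinations_zero]
      cases g with
      | nil => simp [countSub]
      | cons p ps => simp [countSub]
    | succ k =>
      rw [PySem.List.combinations_nil_succ]
      cases g with
      | nil => simp
      | cons p ps => simp [countSub]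
  | cons x xs ih =>
    cases k with
    | zero =>
      rw [PySem.List.combinations_zero]
      cases g with
      | nil => simp [countSub]
      | cons p ps => simp [countSub]
    | succ k =>
      rw [PySem.List.combinations_cons_succ, List.count_append, count_cons_map]
      cases g with
      | nil => simp [ih]
      | cons p ps =>
        simp only [ih]
        simp only [List.length_cons, countSub]
        by_cases hl : ps.length = k
        · by_cases hpx : p = x <;> simp [hl, hpx] <;> omega
        · by_cases hpx : p = x <;> simp [hl, hpx]

def dpv (c : List Int) : List Int → List Int → List Int
  | [], _ => []
  | p :: ps, pre => ((countSub c (pre ++ [p]) : Int)) :: dpv c ps (pre ++ [p])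

lemma countSub_nil_right (c : List Int) : countSub c [] = 1 := by cases c <;> rfl

lemma countSub_nil_append (qs : List Int) (p : Int) : countSub [] (qs ++ [p]) = 0 := by
  cases qs <;> simp [countSub]

lemma countSub_snoc (c : List Int) (x : Int) (pre : List Int) (p : Int) :
    countSub (c ++ [x]) (pre ++ [p]) =
      countSub c (pre ++ [p]) + (if p = x then countSub c pre else 0) := by
  induction c generalizing pre with
  | nil =>
    cases pre with
    | nil => simp [countSub]
    | cons q qs => simp [countSub, countSub_nil_append]
  | cons y c ih =>
    cases pre with
    | nil =>
      simp only [List.nil_append, List.cons_append, countSub]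
      have h0 := ih []
      simp only [List.nil_append] at h0
      rw [h0, countSub_nil_right]
      split_ifs <;> omega
    | cons q qs =>
      simp only [List.cons_append, countSub]
      have h1 := ih (q :: qs)
      have h2 := ih qs
      simp only [List.cons_append] at h1 h2 ⊢
      rw [h1]
      by_cases hqy : q = y
      · rw [if_pos hqy, if_pos hqy, h2]
        split_ifs <;> omega
      · simp [hqy]

lemma dpStep_dpv (x : Int) (c : List Int) (pat : List Int) (pre : List Int) :
    dpStep x pat (dpv c pat pre) ((countSub c pre : Int)) = dpv (c ++ [x]) pat pre := by
  induction pat generalizing pre with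
  | nil => simp [dpStep, dpv]
  | cons p ps ih =>
    simp only [dpv, dpStep, ih (pre ++ [p]), countSub_snoc]
    congr 1
    push_cast
    by_cases hpx : p = x <;> simp [hpx]

lemma dpv_nil (pat : List Int) (pre : List Int) : dpv [] pat pre = List.replicate pat.length 0 := by
  induction pat generalizing pre with
  | nil => simp [dpv]
  | cons p ps ih =>
    simp only [dpv, ih, List.length_cons, List.replicate_succ]
    congr 1
    cases pre <;> simp [countSub]

lemma foldl_dpv (xs : List Int) (c : List Int) (pat : List Int) :
    xs.foldl (fun dp x => dpStep x pat dp 1) (dpv c pat []) = dpv (c ++ xs) pat [] := by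
  induction xs generalizing c with
  | nil => simp
  | cons x xs ih =>
    rw [List.foldl_cons]
    have h1 : dpStep x pat (dpv c pat []) 1 = dpv (c ++ [x]) pat [] := by
      have := dpStep_dpv x c pat []
      simpa [countSub] using this
    rw [h1, ih]
    simp

lemma dpv_getLastD_irrel (c : List Int) (p : Int) (ps pre : List Int) (d : Int) :
    (dpv c (p :: ps) pre).getLastD d = (dpv c (p :: ps) pre).getLastD 0 := by
  rw [show dpv c (p :: ps) pre = ((countSub c (pre ++ [p]) : Int)) :: dpv c ps (pre ++ [p]) from rfl,
      List.getLastD_cons, List.getLastD_cons]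

lemma dpv_getLast (c : List Int) (pat : List Int) (pre : List Int) (h : pat ≠ []) :
    (dpv c pat pre).getLastD 0 = (countSub c (pre ++ pat) : Int) := by
  induction pat generalizing pre with
  | nil => simp at h
  | cons p ps ih =>
    cases ps with
    | nil => simp [dpv]
    | cons q qs =>
      rw [show dpv c (p :: q :: qs) pre
            = ((countSub c (pre ++ [p]) : Int)) :: dpv c (q :: qs) (pre ++ [p]) from rfl,
          List.getLastD_cons, dpv_getLastD_irrel, ih _ (by simp)]
      simp

lemma countSubDP_eq (xs : List Int) (pat : List Int) : countSubDP xs pat = (countSub xs pat : Int) := by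
  by_cases hp : pat = []
  · simp [countSubDP, hp, countSub]
  · rw [countSubDP, if_neg hp]
    rw [show List.replicate pat.length (0:Int) = dpv [] pat [] from (dpv_nil pat []).symm]
    rw [foldl_dpv, List.nil_append, dpv_getLast _ _ _ hp, List.nil_append]

lemma count_filter_pred (l : List (List Int)) (p : List Int → Bool) (v : List Int) :
    (l.filter p).count v = if p v then l.count v else 0 := by
  induction l with
  | nil => simp
  | cons a l ih =>
    rw [List.filter_cons]
    by_cases hav : a = v
    · subst hav
      by_cases hp : p a <;> simp [hp, List.count_cons, ih]
    · by_cases hp : p a <;> simp [hp, List.count_cons, hav, ih]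

lemma combinations_sublist_mem (s : List Int) (k : Nat) (g : List Int)
    (h : g ∈ PySem.List.combinations s k) : g.Sublist s ∧ g.length = k :=
  (PySem.List.mem_combinations_iff s k g).mp h

lemma combinations_pairwise_head (s : List Int) (k : Nat) (hs : s.Pairwise (· ≤ ·)) :
    (PySem.List.combinations s k).Pairwise (fun a b => a.headD 0 ≤ b.headD 0) := by
  induction s generalizing k with
  | nil =>
    cases k with
    | zero => rw [PySem.List.combinations_zero]; simp
    | succ k => rw [PySem.List.combinations_nil_succ]; simp
  | cons x xs ih =>
    cases k with
    | zero => rw [PySem.List.combinations_zero]; simp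
    | succ k =>
      rw [PySem.List.combinations_cons_succ]
      have hxs : xs.Pairwise (· ≤ ·) := (List.pairwise_cons.mp hs).2
      have hx : ∀ w ∈ xs, x ≤ w := (List.pairwise_cons.mp hs).1
      apply List.pairwise_append.mpr
      refine ⟨?_, by exact ih (k := k + 1) hxs, ?_⟩
      · exact List.pairwise_map.mpr (List.pairwise_of_forall_sublist (fun _ => by simp))
      · intro a ha b hb
        obtain ⟨a', _, rfl⟩ := List.mem_map.mp ha
        obtain ⟨hsub, hlen⟩ := combinations_sublist_mem _ _ _ hb
        cases b with
        | nil => simp at hlen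
        | cons h t =>
          have : h ∈ xs := hsub.subset (by simp)
          simpa using hx h this

lemma grp_headD (diff : List Int) (m : Int) (hd : diff.headD 0 = 0) (hne : diff ≠ []) :
    (grp diff m).headD 0 = m := by
  cases diff with
  | nil => simp at hne
  | cons d0 dt => simp [grp]; simp at hd; omega

lemma grp_length (diff : List Int) (m : Int) : (grp diff m).length = diff.length := by
  simp [grp]

lemma grp_pairwise (diff : List Int) (m : Int) (hdiff : diff.Pairwise (· ≤ ·)) :
    (grp diff m).Pairwise (· ≤ ·) := by
  apply List.pairwise_map.mpr
  exact hdiff.imp (by omega)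

lemma grp_inj (diff : List Int) (m m' : Int) (hd : diff.headD 0 = 0) (hne : diff ≠ [])
    (h : grp diff m = grp diff m') : m = m' := by
  have h1 := grp_headD diff m hd hne
  have h2 := grp_headD diff m' hd hne
  rw [h] at h1
  exact h1.symm.trans h2

lemma isMatch_iff (diff g : List Int) (hg : g.Pairwise (· ≤ ·)) (hd : diff.headD 0 = 0)
    (hne : diff ≠ []) : isMatch diff g = true ↔ g = grp diff (g.headD 0) := by
  unfold isMatch
  rw [PySem.List.sorted_eq_self_of_pairwise g (fun y => y) (by simpa using hg)]
  rw [beq_iff_eq]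
  have hcomp : ((fun x => x - g.headD 0) ∘ fun d => g.headD 0 + d) = id :=
    funext (by intro d; simp)
  constructor
  · intro h
    have hmap : g = List.map (fun d => g.headD 0 + d) diff := by
      conv_lhs => rw [show g = (g.map (fun x => x - g.headD 0)).map (fun d => g.headD 0 + d) from by
        rw [List.map_map, show ((fun d => g.headD 0 + d) ∘ fun x => x - g.headD 0) = id from funext (by intro d; simp), List.map_id]]
      rw [h]
    exact hmap.trans (by rfl)
  · intro h
    conv_lhs => rw [h]
    rw [show (grp diff (g.headD 0)).headD 0 = g.headD 0 from grp_headD _ _ hd hne]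
    unfold grp
    rw [List.map_map, hcomp, List.map_id]

lemma isMatch_grp (diff : List Int) (m : Int) (hdiff : diff.Pairwise (· ≤ ·))
    (hd : diff.headD 0 = 0) (hne : diff ≠ []) : isMatch diff (grp diff m) = true := by
  rw [isMatch_iff _ _ (grp_pairwise _ _ hdiff) hd hne, grp_headD _ _ hd hne]

lemma count_flatMap_rep (L : List Int) (c : Int → Nat) (f : Int → List Int) (v : List Int) :
    (L.flatMap (fun m => List.replicate (c m) (f m))).count v
      = (L.map (fun m => if f m = v then c m else 0)).sum := by
  induction L with
  | nil => simp
  | cons m L ih =>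
    simp only [List.flatMap_cons, List.count_append, ih, List.map_cons, List.sum_cons]
    congr 1
    rw [List.count_replicate]
    split_ifs <;> simp_all

lemma sum_map_ite_single (L : List Int) (hnd : L.Nodup) (h : Int) (hm : h ∈ L)
    (f : Int → Nat) (P : Int → Prop) [DecidablePred P] (hP : ∀ m, P m ↔ m = h) :
    (L.map (fun m => if P m then f m else 0)).sum = f h := by
  induction L with
  | nil => simp at hm
  | cons a L ih =>
    simp only [List.map_cons, List.sum_cons]
    rcases List.mem_cons.mp hm with rfl | hmL
    · rw [if_pos ((hP _).mpr rfl)]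
      have : ∀ m ∈ L, ¬ P m := by
        intro m hmem hPm
        exact (List.nodup_cons.mp hnd).1 (((hP m).mp hPm) ▸ hmem)
      have hz : (L.map (fun m => if P m then f m else 0)).sum = 0 := by
        apply List.sum_eq_zero
        intro x hx
        obtain ⟨m, hmem, rfl⟩ := List.mem_map.mp hx
        simp [this m hmem]
      omega
    · have hna : ¬ P a := fun hPa => (List.nodup_cons.mp hnd).1 (((hP a).mp hPa) ▸ hmL)
      rw [if_neg hna, ih (List.nodup_cons.mp hnd).2 hmL]
      omega

lemma pairwise_flatMap_blocks (L : List Int) (f : Int → List (List Int))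
    (R : List Int → List Int → Prop) (hL : L.Pairwise (· < ·))
    (hblock : ∀ m, (f m).Pairwise R)
    (hcross : ∀ m m', m < m' → ∀ a ∈ f m, ∀ b ∈ f m', R a b) :
    (L.flatMap f).Pairwise R := by
  induction L with
  | nil => simp
  | cons m L ih =>
    simp only [List.flatMap_cons]
    apply List.pairwise_append.mpr
    refine ⟨hblock m, ih (List.pairwise_cons.mp hL).2, ?_⟩
    intro a ha b hb
    obtain ⟨m', hm', hbm'⟩ := List.mem_flatMap.mp hb
    exact hcross m m' ((List.pairwise_cons.mp hL).1 m' hm') a ha b hbm'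

lemma pairwise_replicate_refl (n : Nat) (a : List Int) (R : List Int → List Int → Prop)
    (h : R a a) : (List.replicate n a).Pairwise R := by
  induction n with
  | zero => simp
  | succ n ih =>
    rw [List.replicate_succ, List.pairwise_cons]
    exact ⟨fun b hb => (List.eq_of_mem_replicate hb) ▸ h, ih⟩

lemma filter_combinations_eq (s diff : List Int) (hs : s.Pairwise (· ≤ ·))
    (hdiff : diff.Pairwise (· ≤ ·)) (hd : diff.headD 0 = 0) (hne : diff ≠ []) :
    (PySem.List.combinations s diff.length).filter (fun g => isMatch diff g) =
      (uniqHead s).flatMap (fun m => List.replicate (countSub s (grp diff m)) (grp diff m)) := by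
  have huniq_lt := uniqHead_pairwise s hs
  have hnodup : (uniqHead s).Nodup := huniq_lt.imp (fun h => ne_of_lt h)
  have hcnt : ∀ v, ((PySem.List.combinations s diff.length).filter (fun g => isMatch diff g)).count v
      = ((uniqHead s).flatMap (fun m => List.replicate (countSub s (grp diff m)) (grp diff m))).count v := by
    intro v
    rw [count_filter_pred, count_combinations, count_flatMap_rep]
    by_cases hv : countSub s v = 0
    · have hz : ((uniqHead s).map (fun m => if grp diff m = v then countSub s (grp diff m) else 0)).sum = 0 := by
        apply List.sum_eq_zero
        intro x hx
        obtain ⟨m, hmem, rfl⟩ := List.mem_map.mp hx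
        by_cases hgv : grp diff m = v
        · simp [hgv, hv]
        · simp [hgv]
      rw [hz]
      split_ifs <;> simp [hv]
    · have hsubl := countSub_pos_sublist s v (Nat.pos_of_ne_zero hv)
      have hvp : v.Pairwise (· ≤ ·) := hs.sublist hsubl
      by_cases hm : isMatch diff v
      · have hveq := (isMatch_iff diff v hvp hd hne).mp hm
        have hlen : v.length = diff.length := by rw [hveq]; exact grp_length _ _
        have hvne : v ≠ [] := by
          intro hnil; rw [hnil] at hlen; exact hne (List.length_eq_zero_iff.mp hlen.symm)
        have hhead : v.headD 0 ∈ s := by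
          cases v with
          | nil => exact absurd rfl hvne
          | cons a t => exact hsubl.subset (by simp)
        have hhu : v.headD 0 ∈ uniqHead s := (uniqHead_mem s _).mpr hhead
        rw [if_pos hm, if_pos hlen]
        rw [sum_map_ite_single (uniqHead s) hnodup (v.headD 0) hhu
              (fun m => countSub s (grp diff m)) (fun m => grp diff m = v)
              (fun m => by
                constructor
                · intro hgv
                  have hgv' : grp diff m = v := hgv
                  apply grp_inj diff m (v.headD 0) hd hne
                  rw [hgv', ← hveq]
                · intro hmh
                  rw [hmh]
                  show grp diff (v.headD 0) = v
                  exact hveq.symm)]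
        rw [← hveq]
      · rw [if_neg hm]
        symm
        apply List.sum_eq_zero
        intro x hx
        obtain ⟨m, hmem, rfl⟩ := List.mem_map.mp hx
        by_cases hgv : grp diff m = v
        · exact absurd (hgv ▸ isMatch_grp diff m hdiff hd hne) (by simpa using hm)
        · simp [hgv]
  have hperm : ((PySem.List.combinations s diff.length).filter (fun g => isMatch diff g)).Perm
      ((uniqHead s).flatMap (fun m => List.replicate (countSub s (grp diff m)) (grp diff m))) := by
    rw [List.perm_iff_count]
    intro a
    rw [List.count_eq_countP, List.count_eq_countP]
    have := hcnt a
    rwa [List.count_eq_countP, List.count_eq_countP] at this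
  have hmatch_shape : ∀ a, isMatch diff a = true →
      a ∈ PySem.List.combinations s diff.length → a = grp diff (a.headD 0) := by
    intro a hma hmem
    have hsubl := (PySem.List.mem_combinations_iff s diff.length a).mp hmem
    exact (isMatch_iff diff a (hs.sublist hsubl.1) hd hne).mp hma
  apply List.eq_of_perm_of_sorted (le := fun a b => a.headD 0 < b.headD 0 ∨ a = b)
  · rintro a b _ _ (h1 | rfl) (h2 | h3) <;> first | rfl | omega | exact h3.symm
  · -- LHS pairwise
    have h1 : ((PySem.List.combinations s diff.length).filter (fun g => isMatch diff g)).Pairwise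
        (fun a b => a.headD 0 ≤ b.headD 0) :=
      List.Pairwise.sublist List.filter_sublist (combinations_pairwise_head s diff.length hs)
    apply h1.imp_of_mem
    intro a b ha hb hle
    have hae := hmatch_shape a (List.mem_filter.mp ha).2 (List.mem_filter.mp ha).1
    have hbe := hmatch_shape b (List.mem_filter.mp hb).2 (List.mem_filter.mp hb).1
    rcases lt_or_eq_of_le hle with hlt | heq
    · exact Or.inl hlt
    · right; rw [hae, hbe, heq]
  · -- RHS pairwise
    apply pairwise_flatMap_blocks _ _ _ huniq_lt
    · intro m
      exact pairwise_replicate_refl _ _ _ (Or.inr rfl)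
    · intro m m' hlt a ha b hb
      rw [List.eq_of_mem_replicate ha, List.eq_of_mem_replicate hb]
      left
      rw [grp_headD _ _ hd hne, grp_headD _ _ hd hne]
      exact hlt
  · exact hperm

lemma ite_append_skip1 {β : Type} (p : Prop) [Decidable p] (acc v : List β) :
    (if p then acc else acc ++ v) = acc ++ (if p then [] else v) := by
  split_ifs <;> simp

lemma flatMap_replicate {β : Type} (n : Nat) (a : List Int) (f : List Int → List β) :
    (List.replicate n a).flatMap f = (List.replicate n (f a)).flatten := by
  induction n with
  | zero => simp
  | succ n ih => simp [List.replicate_succ, ih]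

lemma flatten_replicate_nil {β : Type} (n : Nat) :
    (List.replicate n ([] : List β)).flatten = [] := by
  induction n with
  | zero => simp
  | succ n ih => simp [List.replicate_succ, ih]

lemma flatten_replicate_single {β : Type} (n : Nat) (z : β) :
    (List.replicate n [z]).flatten = List.replicate n z := by
  induction n with
  | zero => simp
  | succ n ih => simp [List.replicate_succ, ih]

lemma isSubseq_sublist (v s : List Int) : isSubseq v s = true ↔ v.Sublist s := by
  induction s generalizing v with
  | nil => cases v <;> simp [isSubseq]
  | cons y ys ih =>
    cases v with
    | nil => simp [isSubseq]
    | cons x xs =>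
      by_cases hxy : x = y
      · subst hxy
        rw [show isSubseq (x :: xs) (x :: ys) = isSubseq xs ys from by simp [isSubseq]]
        rw [ih, List.cons_sublist_cons]
      · rw [show isSubseq (x :: xs) (y :: ys) = isSubseq (x :: xs) ys from by simp [isSubseq, hxy]]
        rw [ih]
        constructor
        · exact fun h => h.cons y
        · intro h
          cases h with
          | cons _ h => exact h
          | cons₂ => exact absurd rfl hxy

lemma per_state (fixed : List (List Int)) (diff s : List Int) (o0 : Int)
    (hs : s.Pairwise (· ≤ ·)) (hdiff : diff.Pairwise (· ≤ ·)) (hd : diff.headD 0 = 0)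
    (hne : diff ≠ []) :
    ((PySem.List.combinations s diff.length).filter (fun g => isMatch diff g)).flatMap
        (fun g =>
          if fixed.contains (PySem.List.sorted ((g.foldl (fun p piece => (PySem.List.remove? p piece).getD p) s) ++ [g.headD 0 - o0]) (fun y => y))
          then []
          else [[PySem.List.sorted ((g.foldl (fun p piece => (PySem.List.remove? p piece).getD p) s) ++ [g.headD 0 - o0]) (fun y => y), s]]) =
      (if s.length < diff.length then []
       else (uniqHead s).flatMap (fun m =>
        if (!(isSubseq (diff.map (fun d => m + d)) s)) = true then []
        else
          if fixed.contains (PySem.List.sorted (((diff.map (fun d => m + d)).foldl (fun p piece => (PySem.List.remove? p piece).getD p) s) ++ [m - o0]) (fun y => y))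
          then []
          else List.replicate (countSubDP s (diff.map (fun d => m + d))).toNat
            [PySem.List.sorted (((diff.map (fun d => m + d)).foldl (fun p piece => (PySem.List.remove? p piece).getD p) s) ++ [m - o0]) (fun y => y), s])) := by
  by_cases hlen : s.length < diff.length
  · rw [if_pos hlen, PySem.List.combinations_eq_nil_of_length_lt s hlen]
    simp
  · rw [if_neg hlen]
    rw [filter_combinations_eq s diff hs hdiff hd hne, List.flatMap_assoc]
    rw [List.flatMap_def, List.flatMap_def, List.map_congr_left]
    intro m hm
    have hgm : (grp diff m).headD 0 = m := grp_headD _ _ hd hne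
    have hgr : List.map (fun d => m + d) diff = grp diff m := rfl
    simp only [hgr, countSubDP_eq]
    by_cases hsub : isSubseq (grp diff m) s = true
    · rw [if_neg (by simp [hsub]), flatMap_replicate, hgm]
      by_cases hcont : fixed.contains (PySem.List.sorted (((grp diff m).foldl (fun p piece => (PySem.List.remove? p piece).getD p) s) ++ [m - o0]) (fun y => y))
      · rw [if_pos hcont, if_pos hcont, flatten_replicate_nil]
      · rw [if_neg hcont, if_neg hcont, flatten_replicate_single, Int.toNat_natCast]
    · rw [Bool.not_eq_true] at hsub
      have hc0 : countSub s (grp diff m) = 0 := by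
        by_contra hzz
        rw [(isSubseq_sublist _ _).mpr (countSub_pos_sublist _ _ (Nat.pos_of_ne_zero hzz))] at hsub
        simp at hsub
      rw [hc0, if_pos (by simp [hsub])]
      simp

theorem main_eq (base : List Int) (equal : List (List Int)) (hpre : base ≠ []) :
    backwards base equal = backwards_alt base equal := by
  obtain ⟨o, t, hot⟩ : ∃ o t, PySem.List.sorted base (fun x => x) = o :: t := by
    cases h : PySem.List.sorted base (fun x => x) with
    | nil => exact absurd ((PySem.List.sorted_eq_nil_iff base (fun x => x) false).mp h) hpre
    | cons o t => exact ⟨o, t, rfl⟩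
  simp only [backwards, backwards_alt, hot, List.headD_cons]
  have hop : (o :: t).Pairwise (· ≤ ·) := by
    have h := PySem.List.sorted_pairwise base (fun x => x)
    rw [hot] at h; exact h
  set fixed := List.map (fun x => PySem.List.sorted x fun y => y) equal with hfx
  set diff := List.map (fun x => x - o) (o :: t) with hdf
  have hdiff : diff.Pairwise (· ≤ ·) := List.pairwise_map.mpr (hop.imp (fun h => by omega))
  have hd : diff.headD 0 = 0 := by simp [hdf]
  have hne : diff ≠ [] := by simp [hdf]
  simp only [PySem.List.foldl_append_if, ite_append_skip1,
    PySem.List.foldl_append_eq_flatMap, List.nil_append]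
  rw [List.flatMap_assoc]
  simp only [List.flatMap_map]
  rw [List.flatMap_def, List.flatMap_def]
  apply congrArg
  apply List.map_congr_left
  intro s hsmem
  obtain ⟨x, hx, rfl⟩ := List.mem_map.mp hsmem
  exact per_state fixed diff (PySem.List.sorted x fun y => y) o
    (by simpa using PySem.List.sorted_pairwise x (fun y => y)) hdiff hd hne

-- ===== VERDICT (by name: the statement is the Claim_ definition above) =====
theorem backwards_spec : Claim_equal_backwards := by
  intro base equal _ hpre
  exact main_eq base equal hpre
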